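-- pv_equiv track=rewrite | github.com/StavLidor/-Iris-flower-classification | ex2.py | most_app
-- ===== SOURCE A (Python) =====
-- def most_app(list_f):
--     l = []
--     #count hpw mach appear for number in the list
--     for x in list_f:
--         l.append(list_f.count(x))
--     # find the count of the number most appear
--     max_app = max(l)
--     size = len(list_f)
--     # list_tag will be in her all the number that most appear
--     list_tag = []
--     for i in range(size):
--         if list_f[i] not in list_tag and l[i] == max_app:
--             list_tag.append(list_f[i])
--     # return the most appear that minimum tag
--     if 0 in list_tag:
--         return 0
--     if 1 in list_tag:
--         return 1
--     if 2 in list_tag: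
--         return 2
-- ===== SOURCE B (Python) =====
-- def most_app(list_f):
--     # sort, then one run-length scan to get the maximal frequency
--     s = sorted(list_f)
--     best = 0
--     run = 0
--     prev = None
--     for x in s:
--         if run > 0 and x == prev:
--             run += 1
--         else:
--             run = 1
--             prev = x
--         if run > best:
--             best = run
--     for v in (0, 1, 2):
--         if s.count(v) == best:
--             return v
--     return None
-- ===== Notes on version B (the rewrite author's own statement) =====
-- stated objective: faster
-- what changed: B sorts a copy of the list and takes the maximal frequency as the longest run of equal consecutive elements in one scan, replacing A's per-element list.count scans and its tag-collection loop; then it returns the first of 0,1,2 whose count equals that maximum.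
import Mathlib
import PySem

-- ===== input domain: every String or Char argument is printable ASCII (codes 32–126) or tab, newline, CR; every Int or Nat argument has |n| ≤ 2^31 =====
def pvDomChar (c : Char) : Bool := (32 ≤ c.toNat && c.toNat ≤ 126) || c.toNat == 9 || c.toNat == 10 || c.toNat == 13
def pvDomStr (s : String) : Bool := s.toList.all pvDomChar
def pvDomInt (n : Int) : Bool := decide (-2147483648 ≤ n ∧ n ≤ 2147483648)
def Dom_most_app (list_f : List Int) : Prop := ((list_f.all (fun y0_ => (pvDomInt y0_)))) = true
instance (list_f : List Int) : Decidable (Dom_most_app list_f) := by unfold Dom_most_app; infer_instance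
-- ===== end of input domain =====

-- B sorts a copy of the list and reads the maximal frequency off as the longest run of equal
-- consecutive elements in one scan, instead of A's per-element list.count scans and tag list
-- (objective: faster, sort-then-group instead of quadratic counting).

-- ===== PORT A =====
def most_app (list_f : List Int) : Option Int :=
  -- l = [list_f.count(x) for x in list_f] built by append, as in A
  let l := list_f.foldl (fun acc x => acc ++ [(PySem.List.count list_f x : Int)]) []
  -- max(l): raises on empty list, excluded by Pre_; .getD 0 is never used inside Pre_
  let max_app := (PySem.List.max? l (fun y => y)).getD 0
  let size := (list_f.length : Int)
  let list_tag := (PySem.List.pyRange 0 size 1).foldl (fun acc i =>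
      if ¬ (PySem.List.pyGetD list_f i 0) ∈ acc ∧ PySem.List.pyGetD l i 0 = max_app
      then acc ++ [PySem.List.pyGetD list_f i 0] else acc) ([] : List Int)
  if (0 : Int) ∈ list_tag then some 0
  else if (1 : Int) ∈ list_tag then some 1
  else if (2 : Int) ∈ list_tag then some 2
  else none

-- ===== PORT B =====
-- one step of B's run-length scan over the sorted list: state (best, run, prev)
def bstep (st : Int × Int × Option Int) (x : Int) : Int × Int × Option Int :=
  match st with
  | (best, run, prev) =>
    let (run', prev') := if 0 < run ∧ prev = some x then (run + 1, prev) else (1, some x)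
    (if best < run' then run' else best, run', prev')

def most_app_alt (list_f : List Int) : Option Int :=
  let s := PySem.List.sorted list_f (fun x => x) false
  -- best/run/prev scan over the sorted copy
  let best := (s.foldl bstep ((0 : Int), (0 : Int), (none : Option Int))).1
  if (PySem.List.count s 0 : Int) = best then some 0
  else if (PySem.List.count s 1 : Int) = best then some 1
  else if (PySem.List.count s 2 : Int) = best then some 2
  else none

-- ===== PRECONDITION & SPEC =====
-- Pre_ excludes exactly the empty list, on which A's max(l) raises ValueError.
def Pre_most_app (list_f : List Int) : Prop := list_f ≠ []
instance (list_f : List Int) : Decidable (Pre_most_app list_f) := by unfold Pre_most_app; infer_instance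
def pvWitness_most_app : List Int := [1, 0, 1, 2]

def Spec_most_app (list_f : List Int) (out : Option Int) : Prop := out = most_app_alt list_f
instance (list_f : List Int) (out : Option Int) : Decidable (Spec_most_app list_f out) := by unfold Spec_most_app; infer_instance

-- ===== CLAIM (what is proved, stated in full; the proofs are below) =====
def Claim_equal_most_app : Prop := ∀ (list_f : List Int), Dom_most_app list_f → Pre_most_app list_f → Spec_most_app list_f (most_app list_f)

-- ===== LEMMAS AND PROOFS =====

-- A's tag-collection step, as a fold over the elements of the list
def tagStep (M : Int) (lf : List Int) (acc : List Int) (x : Int) : List Int :=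
  if ¬ x ∈ acc ∧ (PySem.List.count lf x : Int) = M then acc ++ [x] else acc

theorem mem_foldl_tagStep (lf : List Int) (M : Int) (xs : List Int) (acc : List Int) (v : Int) :
    v ∈ xs.foldl (tagStep M lf) acc ↔ v ∈ acc ∨ (v ∈ xs ∧ (PySem.List.count lf v : Int) = M) := by
  induction xs generalizing acc with
  | nil => simp
  | cons x xs ih =>
    simp only [List.foldl_cons, ih, tagStep]
    by_cases hq : (PySem.List.count lf x : Int) = M
    · by_cases hx : x ∈ acc
      · rw [if_neg (by tauto)]
        constructor
        · rintro (ha | ⟨hm, hc⟩)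
          exacts [Or.inl ha, Or.inr ⟨List.mem_cons_of_mem _ hm, hc⟩]
        · rintro (ha | ⟨hm, hc⟩)
          · exact Or.inl ha
          · rcases List.mem_cons.mp hm with rfl | hm
            · exact Or.inl hx
            · exact Or.inr ⟨hm, hc⟩
      · rw [if_pos ⟨hx, hq⟩]
        constructor
        · rintro (ha | ⟨hm, hc⟩)
          · rcases List.mem_append.mp ha with ha | ha
            · exact Or.inl ha
            · exact Or.inr ⟨List.mem_cons.mpr (Or.inl (List.mem_singleton.mp ha)), by
                rw [List.mem_singleton.mp ha]; exact hq⟩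
          · exact Or.inr ⟨List.mem_cons_of_mem _ hm, hc⟩
        · rintro (ha | ⟨hm, hc⟩)
          · exact Or.inl (List.mem_append.mpr (Or.inl ha))
          · rcases List.mem_cons.mp hm with rfl | hm
            · exact Or.inl (List.mem_append.mpr (Or.inr (List.mem_singleton.mpr rfl)))
            · exact Or.inr ⟨hm, hc⟩
    · rw [if_neg (by tauto)]
      constructor
      · rintro (ha | ⟨hm, hc⟩)
        exacts [Or.inl ha, Or.inr ⟨List.mem_cons_of_mem _ hm, hc⟩]
      · rintro (ha | ⟨hm, hc⟩)
        · exact Or.inl ha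
        · rcases List.mem_cons.mp hm with rfl | hm
          · exact absurd hc hq
          · exact Or.inr ⟨hm, hc⟩

-- B's run-length scan over a sorted nonempty list ends with prev = the last element,
-- run = its count, and best = a count that bounds every element's count (the max frequency).
theorem scan_spec (s : List Int) (x : Int) (hs : (s ++ [x]).Pairwise (· ≤ ·)) :
    ∃ B : Int,
      (s ++ [x]).foldl bstep ((0 : Int), (0 : Int), (none : Option Int))
        = (B, ((s ++ [x]).count x : Int), some x)
      ∧ (∃ y ∈ s ++ [x], ((s ++ [x]).count y : Int) = B)
      ∧ (∀ y ∈ s ++ [x], ((s ++ [x]).count y : Int) ≤ B) := by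
  induction s using List.reverseRecOn generalizing x with
  | nil =>
    refine ⟨1, ?_, ⟨x, by simp, by simp⟩, ?_⟩
    · simp [bstep]
    · intro y hy
      simp only [List.nil_append, List.mem_singleton] at hy
      subst hy; simp
  | append_singleton l a ih =>
    have hp : (l ++ [a]).Pairwise (· ≤ ·) := (List.pairwise_append.mp hs).1
    have hle : ∀ z ∈ l ++ [a], z ≤ x := by
      intro z hz
      exact (List.pairwise_append.mp hs).2.2 z hz x (List.mem_singleton.mpr rfl)
    obtain ⟨B, hfold, ⟨y0, hy0m, hy0c⟩, hbd⟩ := ih a hp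
    have hrunpos : (0 : Int) < ((l ++ [a]).count a : Int) := by
      have : 0 < (l ++ [a]).count a := List.count_pos_iff.mpr (by simp)
      exact_mod_cast this
    rw [List.foldl_append, hfold]
    simp only [List.foldl_cons, List.foldl_nil]
    by_cases hax : a = x
    · subst hax
      rw [show bstep (B, ((l ++ [a]).count a : Int), some a) a
            = (if B < (l ++ [a]).count a + 1 then ((l ++ [a]).count a : Int) + 1 else B,
               ((l ++ [a]).count a : Int) + 1, some a) by
          simp [bstep]]
      have hcnt : (((l ++ [a]) ++ [a]).count a : Int) = ((l ++ [a]).count a : Int) + 1 := by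
        have h0 : ((l ++ [a]) ++ [a]).count a = (l ++ [a]).count a + 1 := by
          rw [List.count_append]; simp
        rw [h0]; push_cast; ring
      have hcnt' : ∀ z : Int, z ≠ a →
          (((l ++ [a]) ++ [a]).count z) = ((l ++ [a]).count z) := by
        intro z hz
        have h0 : (([a] : List Int).count z) = 0 := List.count_eq_zero.mpr (by simp [hz])
        rw [List.count_append, h0]
        omega
      by_cases hB : B < (l ++ [a]).count a + 1
      · refine ⟨((l ++ [a]).count a : Int) + 1, by rw [if_pos hB, hcnt], ⟨a, by simp, by
          rw [hcnt]⟩, ?_⟩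
        intro y hy
        rcases List.mem_append.mp hy with hy | hy
        · by_cases hya : y = a
          · subst hya; rw [hcnt]
          · rw [show (((l ++ [a]) ++ [a]).count y : Int) = ((l ++ [a]).count y : Int) by
              rw [hcnt' y hya]]
            have := hbd y hy
            omega
        · rw [List.mem_singleton.mp hy, hcnt]
      · have hy0a : y0 ≠ a := by
          intro h; subst h; omega
        refine ⟨B, by rw [if_neg hB, hcnt], ⟨y0, List.mem_append.mpr (Or.inl hy0m), by
          rw [show (((l ++ [a]) ++ [a]).count y0 : Int) = ((l ++ [a]).count y0 : Int) by
            rw [hcnt' y0 hy0a]]; exact hy0c⟩, ?_⟩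
        intro y hy
        rcases List.mem_append.mp hy with hy | hy
        · by_cases hya : y = a
          · subst hya; rw [hcnt]; omega
          · rw [show (((l ++ [a]) ++ [a]).count y : Int) = ((l ++ [a]).count y : Int) by
              rw [hcnt' y hya]]
            exact hbd y hy
        · rw [List.mem_singleton.mp hy, hcnt]; omega
    · -- new element starts a run of length 1; x does not occur in l ++ [a]
      have hxnot : x ∉ l ++ [a] := by
        intro hx
        have hxa : x ≤ a := by
          rcases List.mem_append.mp hx with hx | hx
          · exact (List.pairwise_append.mp hp).2.2 x hx a (List.mem_singleton.mpr rfl)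
          · rw [List.mem_singleton.mp hx]
        have hax' : a ≤ x := hle a (by simp)
        exact hax (le_antisymm hax' hxa)
      have hcx : (((l ++ [a]) ++ [x]).count x : Int) = 1 := by
        have h1 : ((l ++ [a]) ++ [x]).count x = (l ++ [a]).count x + 1 := by
          rw [List.count_append]; simp
        rw [h1, List.count_eq_zero.mpr hxnot]
        simp
      have hcz : ∀ z : Int, z ≠ x →
          (((l ++ [a]) ++ [x]).count z) = ((l ++ [a]).count z) := by
        intro z hz
        have h0 : (([x] : List Int).count z) = 0 := List.count_eq_zero.mpr (by simp [hz])
        rw [List.count_append, h0]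
        omega
      have hBpos : (1 : Int) ≤ B := by
        have := hbd a (by simp)
        omega
      rw [show bstep (B, ((l ++ [a]).count a : Int), some a) x
            = (if B < 1 then (1 : Int) else B, (1 : Int), some x) by
          simp [bstep, hax]]
      rw [if_neg (by omega), ← hcx]
      have hy0x : y0 ≠ x := fun h => hxnot (h ▸ hy0m)
      refine ⟨B, rfl, ⟨y0, List.mem_append.mpr (Or.inl hy0m), by
        rw [show (((l ++ [a]) ++ [x]).count y0 : Int) = ((l ++ [a]).count y0 : Int) by
          rw [hcz y0 hy0x]]; exact hy0c⟩, ?_⟩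
      intro y hy
      rcases List.mem_append.mp hy with hy | hy
      · have hyx : y ≠ x := fun h => hxnot (h ▸ hy)
        rw [show (((l ++ [a]) ++ [x]).count y : Int) = ((l ++ [a]).count y : Int) by
          rw [hcz y hyx]]
        exact hbd y hy
      · rw [List.mem_singleton.mp hy, hcx]; omega

-- ===== VERDICT (by name: the statement is the Claim_ definition above) =====
theorem most_app_spec : Claim_equal_most_app := by
  intro list_f _ hpre
  have hpre' : list_f ≠ [] := hpre
  unfold Spec_most_app most_app most_app_alt
  simp only [PySem.List.foldl_append_singleton_eq_map, List.nil_append]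
  -- name A's maximal count M
  set M := (PySem.List.max? (list_f.map (fun x => (PySem.List.count list_f x : Int)))
      (fun y => y)).getD 0 with hMdef
  -- A's index loop is a fold of tagStep over the elements
  have hfold : (PySem.List.pyRange 0 (list_f.length : Int) 1).foldl
      (fun acc i => if ¬ (PySem.List.pyGetD list_f i 0) ∈ acc ∧
          PySem.List.pyGetD (list_f.map (fun x => (PySem.List.count list_f x : Int))) i 0 = M
        then acc ++ [PySem.List.pyGetD list_f i 0] else acc) []
      = list_f.foldl (tagStep M list_f) [] := by
    rw [PySem.List.foldl_congr_mem _ _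
        (fun acc i => tagStep M list_f acc (PySem.List.pyGetD list_f i 0)) _ ?_]
    · exact PySem.List.foldl_pyRange_zero_pyGetD' list_f 0 _ []
    · intro acc i hi
      rw [PySem.List.mem_pyRange_one] at hi
      have hlt : i < ((list_f.map (fun x => (PySem.List.count list_f x : Int))).length : Int) := by
        simpa using hi.2
      simp only [tagStep]
      rw [PySem.List.pyGetD_eq_getElem _ 0 hi.1 hlt,
          PySem.List.pyGetD_eq_getElem list_f 0 hi.1 hi.2]
      simp only [List.getElem_map]
  simp only [hfold]
  -- facts about M: some element realises it, and it bounds every count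
  obtain ⟨m, hm⟩ : ∃ m, PySem.List.max?
      (list_f.map (fun x => (PySem.List.count list_f x : Int))) (fun y => y) = some m := by
    cases hma : PySem.List.max?
        (list_f.map (fun x => (PySem.List.count list_f x : Int))) (fun y => y) with
    | none =>
      exact absurd (List.map_eq_nil_iff.mp ((PySem.List.max?_eq_none_iff _ _).mp hma)) hpre'
    | some a => exact ⟨a, rfl⟩
  have hMm : M = m := by rw [hMdef, hm, Option.getD_some]
  obtain ⟨y1, hy1m, hy1c⟩ : ∃ y1 ∈ list_f, (PySem.List.count list_f y1 : Int) = m := by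
    rcases List.mem_map.mp (PySem.List.max?_mem hm) with ⟨y1, hy1, hc⟩
    exact ⟨y1, hy1, hc⟩
  have hMbd : ∀ y ∈ list_f, (PySem.List.count list_f y : Int) ≤ m := by
    intro y hy
    exact PySem.List.max?_isMax hm _ (List.mem_map.mpr ⟨y, hy, rfl⟩)
  have hMpos : 0 < M := by
    rw [hMm, ← hy1c]
    simp only [PySem.List.count_eq]
    have : 0 < List.count y1 list_f := List.count_pos_iff.mpr hy1m
    exact_mod_cast this
  -- the sorted copy and B's scan
  have hperm : (PySem.List.sorted list_f (fun x => x) false).Perm list_f :=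
    PySem.List.sorted_perm list_f (fun x => x) false
  have hcount : ∀ v : Int, PySem.List.count (PySem.List.sorted list_f (fun x => x) false) v
      = PySem.List.count list_f v := by
    intro v
    simp only [PySem.List.count_eq]
    exact hperm.count_eq v
  obtain ⟨l', x, hsx⟩ : ∃ l' x, PySem.List.sorted list_f (fun x => x) false = l' ++ [x] := by
    rcases List.eq_nil_or_concat (PySem.List.sorted list_f (fun x => x) false) with h | ⟨l', x, h⟩
    · exact absurd ((PySem.List.sorted_eq_nil_iff _ _ _).mp h) hpre'
    · exact ⟨l', x, by rw [h, List.concat_eq_append]⟩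
  have hpw : (l' ++ [x]).Pairwise (· ≤ ·) := by
    have := PySem.List.sorted_pairwise list_f (fun x => x)
    rw [hsx] at this
    simpa using this
  obtain ⟨B, hfoldB, ⟨y0, hy0m, hy0c⟩, hBbd⟩ := scan_spec l' x hpw
  -- best = M
  have hBM : B = M := by
    rw [hMm]
    have hmem_iff : ∀ z : Int, z ∈ l' ++ [x] ↔ z ∈ list_f := by
      intro z
      rw [← hsx]; exact hperm.mem_iff
    have hc_eq : ∀ z : Int, ((l' ++ [x]).count z : Int) = (PySem.List.count list_f z : Int) := by
      intro z
      have := hcount z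
      rw [hsx] at this
      simp only [PySem.List.count_eq] at this ⊢
      exact_mod_cast this
    have h1 : B ≤ m := by
      rw [← hy0c, hc_eq]
      exact hMbd y0 ((hmem_iff y0).mp hy0m)
    have h2 : m ≤ B := by
      rw [← hy1c, ← hc_eq]
      exact hBbd y1 ((hmem_iff y1).mpr hy1m)
    omega
  -- both sides' conditions are 'count v = M'
  have hiff : ∀ v : Int, (v ∈ list_f.foldl (tagStep M list_f) [])
      ↔ ((PySem.List.count (PySem.List.sorted list_f (fun x => x) false) v : Int)
          = ((PySem.List.sorted list_f (fun x => x) false).foldl bstep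
              ((0 : Int), (0 : Int), (none : Option Int))).1) := by
    intro v
    have hc_eq : ((l' ++ [x]).count v : Int) = (List.count v list_f : Int) := by
      have := hperm.count_eq v
      rw [hsx] at this
      exact_mod_cast this
    rw [mem_foldl_tagStep, hsx, hfoldB]
    simp only [List.not_mem_nil, false_or, PySem.List.count_eq, hBM, hc_eq]
    constructor
    · rintro ⟨_, hc⟩
      exact hc
    · intro hc
      refine ⟨?_, hc⟩
      have hpos : (0 : Int) < (List.count v list_f : Int) := by omega
      have hpos' : 0 < List.count v list_f := by exact_mod_cast hpos
      exact List.count_pos_iff.mp hpos'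
  simp only [hiff]
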